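-- pv_equiv track=rewrite | github.com/OU-Libraries/cdm-util-scripts | src/cdm_util_scripts/ftpfields2catcher.py | apply_field_mapping
-- ===== SOURCE A (Python) =====
-- from typing import Optional, List, Iterable, Dict, Sequence, Callable, Tuple
--
-- def apply_field_mapping(ftp_fields: Dict[str, str], field_mapping: Dict[str, Sequence[str]]) -> Dict[str, str]:
--     accumulator = dict()
--     for label, nicks in field_mapping.items():
--         ftp_field = ftp_fields[label]
--         for nick in nicks:
--             if nick in accumulator:
--                 if ftp_field:
--                     if accumulator[nick]:
--                         accumulator[nick] = '; '.join([
--                             accumulator[nick],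
--                             ftp_field
--                         ])
--                     else:
--                         accumulator[nick] = ftp_field
--             else:
--                 accumulator[nick] = ftp_field
--     return accumulator
-- ===== SOURCE B (Python) =====
-- def apply_field_mapping(ftp_fields, field_mapping):
--     groups = {}
--     for label, nicks in field_mapping.items():
--         ftp_field = ftp_fields[label]
--         for nick in nicks:
--             groups.setdefault(nick, []).append(ftp_field)
--     return {nick: '; '.join(v for v in vals if v) for nick, vals in groups.items()}
-- ===== Notes on version B (the rewrite author's own statement) =====
-- stated objective: simpler
-- what changed: B groups then formats: a first pass builds an order-preserving dict from nick to the list of its ftp_field values, and a second pass renders each nick as '; '.join of its non-empty values, replacing A's inline three-way conditional joining inside the loop.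
import Mathlib
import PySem

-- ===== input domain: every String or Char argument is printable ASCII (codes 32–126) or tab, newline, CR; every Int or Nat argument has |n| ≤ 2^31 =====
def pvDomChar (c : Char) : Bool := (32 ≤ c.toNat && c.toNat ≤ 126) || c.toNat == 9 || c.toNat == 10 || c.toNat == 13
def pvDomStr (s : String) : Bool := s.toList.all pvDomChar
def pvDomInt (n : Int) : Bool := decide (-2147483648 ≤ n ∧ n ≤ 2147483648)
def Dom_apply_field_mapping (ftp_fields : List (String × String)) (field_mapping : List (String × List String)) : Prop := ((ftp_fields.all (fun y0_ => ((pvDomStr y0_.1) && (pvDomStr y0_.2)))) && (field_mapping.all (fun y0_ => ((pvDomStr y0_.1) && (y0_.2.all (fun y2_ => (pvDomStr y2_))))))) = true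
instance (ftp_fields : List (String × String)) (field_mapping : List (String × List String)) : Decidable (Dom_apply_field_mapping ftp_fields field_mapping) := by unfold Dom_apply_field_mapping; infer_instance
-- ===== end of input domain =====

-- B replaces A's inline three-way conditional joining by a group-then-format two-pass
-- structure (objective: simpler). Equivalence of RETURN values on inputs where A does
-- not raise KeyError (see Pre_).

-- ===== PORT A =====
-- one nick step of A's inner loop
def pvStepA (f : String) (acc : PySem.Dict String String) (nick : String) : PySem.Dict String String :=
  if acc.contains nick then
    if f ≠ "" then
      if acc.getD nick "" ≠ "" then acc.insert nick (acc.getD nick "" ++ "; " ++ f)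
      else acc.insert nick f
    else acc
  else acc.insert nick f

def apply_field_mapping (ftp_fields : List (String × String)) (field_mapping : List (String × List String)) : List (String × String) :=
  (field_mapping.foldl (fun (acc : PySem.Dict String String) lp =>
    -- ftp_field = ftp_fields[label]; KeyError (missing label) is excluded by Pre_, getD's default is never used there
    let f := (PySem.Dict.mk ftp_fields).getD lp.1 ""
    lp.2.foldl (pvStepA f) acc) (PySem.Dict.mk [])).items

-- ===== PORT B =====
-- '; '.join of a list of strings (hand port of str.join, exact)
def pvSemijoin : List String → String
  | [] => ""
  | x :: xs => xs.foldl (fun a b => a ++ "; " ++ b) x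

def apply_field_mapping_alt (ftp_fields : List (String × String)) (field_mapping : List (String × List String)) : List (String × String) :=
  let groups := field_mapping.foldl (fun (g : PySem.Dict String (List String)) lp =>
    let f := (PySem.Dict.mk ftp_fields).getD lp.1 ""
    -- groups.setdefault(nick, []).append(ftp_field)
    lp.2.foldl (fun g nick => g.insert nick (g.getD nick [] ++ [f])) g) (PySem.Dict.mk [])
  groups.items.map (fun p => (p.1, pvSemijoin (p.2.filter (· ≠ ""))))

-- ===== PRECONDITION & SPEC =====
-- Pre_ excludes exactly the inputs where A raises KeyError: a label of field_mapping absent from ftp_fields.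
def Pre_apply_field_mapping (ftp_fields : List (String × String)) (field_mapping : List (String × List String)) : Prop :=
  ∀ p ∈ field_mapping, p.1 ∈ ftp_fields.map Prod.fst
instance (ftp_fields : List (String × String)) (field_mapping : List (String × List String)) : Decidable (Pre_apply_field_mapping ftp_fields field_mapping) := by unfold Pre_apply_field_mapping; infer_instance

def pvWitness_apply_field_mapping : (List (String × String)) × (List (String × List String)) :=
  ([("title", "A Book"), ("author", "")], [("title", ["ti"]), ("author", ["au", "ti"])])

def Spec_apply_field_mapping (ftp_fields : List (String × String)) (field_mapping : List (String × List String)) (out : List (String × String)) : Prop := out = apply_field_mapping_alt ftp_fields field_mapping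
instance (ftp_fields : List (String × String)) (field_mapping : List (String × List String)) (out : List (String × String)) : Decidable (Spec_apply_field_mapping ftp_fields field_mapping out) := by unfold Spec_apply_field_mapping; infer_instance

-- ===== CLAIM (what is proved, stated in full; the proofs are below) =====
def Claim_equal_apply_field_mapping : Prop := ∀ (ftp_fields : List (String × String)) (field_mapping : List (String × List String)), Dom_apply_field_mapping ftp_fields field_mapping → Pre_apply_field_mapping ftp_fields field_mapping → Spec_apply_field_mapping ftp_fields field_mapping (apply_field_mapping ftp_fields field_mapping)

-- ===== LEMMAS AND PROOFS =====

-- the rendering of one nick's collected values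
def pvJ (vs : List String) : String := pvSemijoin (vs.filter (· ≠ ""))

-- render B's grouping dict into A's accumulator shape
def pvRender (g : PySem.Dict String (List String)) : PySem.Dict String String :=
  PySem.Dict.mk (g.items.map (fun p => (p.1, pvJ p.2)))

theorem pvSemijoin_foldl_ne (xs : List String) (a : String) (ha : a ≠ "") :
    xs.foldl (fun a b => a ++ "; " ++ b) a ≠ "" := by
  induction xs generalizing a with
  | nil => exact ha
  | cons x xs ih =>
      apply ih
      intro h
      have := congrArg String.length h
      simp [String.length_append] at this

theorem pvJ_append (vs : List String) (f : String) :
    pvJ (vs ++ [f]) =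
      if f = "" then pvJ vs
      else if pvJ vs = "" then f else pvJ vs ++ "; " ++ f := by
  by_cases hf : f = ""
  · simp [pvJ, hf]
  · have hfil : (vs ++ [f]).filter (· ≠ "") = vs.filter (· ≠ "") ++ [f] := by
      simp [List.filter_append, hf]
    unfold pvJ
    rw [hfil]
    rcases h : vs.filter (· ≠ "") with _ | ⟨x, xs⟩
    · simp [pvSemijoin]
    · have hx : x ≠ "" := by
        have hm : x ∈ vs.filter (· ≠ "") := h ▸ List.mem_cons_self
        simpa using List.of_mem_filter hm
      have hne : List.foldl (fun a b => a ++ "; " ++ b) x xs ≠ "" :=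
        pvSemijoin_foldl_ne xs x hx
      simp [pvSemijoin, List.foldl_append, hf]
      exact hne

theorem pvRender_get? (g : PySem.Dict String (List String)) (k : String) :
    (pvRender g).get? k = (g.get? k).map pvJ := by
  unfold pvRender
  obtain ⟨l⟩ := g
  induction l with
  | nil => simp [PySem.Dict.get?]
  | cons p l ih =>
      simp only [List.map_cons]
      rw [PySem.Dict.get?_mk_cons, PySem.Dict.get?_mk_cons]
      by_cases hp : p.1 == k <;> simp [hp, ih]

theorem pvRender_contains (g : PySem.Dict String (List String)) (k : String) :
    (pvRender g).contains k = g.contains k := by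
  rw [PySem.Dict.contains_eq_isSome_get?, PySem.Dict.contains_eq_isSome_get?, pvRender_get?]
  cases g.get? k <;> rfl

theorem pvRender_insert (g : PySem.Dict String (List String)) (k : String) (v : List String) :
    pvRender (g.insert k v) = (pvRender g).insert k (pvJ v) := by
  apply PySem.Dict.ext
  have hc := pvRender_contains g k
  rw [show (pvRender (g.insert k v)).items = (g.insert k v).items.map (fun p => (p.1, pvJ p.2)) from rfl]
  rw [PySem.Dict.items_insert, PySem.Dict.items_insert, hc]
  split
  · rw [show (pvRender g).items = g.items.map (fun p => (p.1, pvJ p.2)) from rfl,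
       List.map_map, List.map_map]
    apply List.map_congr_left
    intro p _
    by_cases hpk : p.1 = k <;> simp [hpk]
  · simp [pvRender]

theorem pvMap_replace_self (l : List (String × String)) (k v : String)
    (hnd : (l.map Prod.fst).Nodup)
    (h : ∀ p ∈ l, p.1 = k → p.2 = v) :
    l.map (fun p => if p.1 == k then (k, v) else p) = l := by
  induction l with
  | nil => rfl
  | cons p l ih =>
      simp only [List.map_cons, List.nodup_cons] at hnd ⊢
      rw [ih hnd.2 (fun q hq hk => h q (List.mem_cons_of_mem _ hq) hk)]
      by_cases hp : p.1 == k
      · have hpk : p.1 = k := by simpa using hp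
        have := h p (List.mem_cons_self) hpk
        simp [← hpk, ← this]
      · simp [hp]

theorem pvInsert_self (d : PySem.Dict String String) (k v : String)
    (hnd : d.keys.Nodup) (h : d.get? k = some v) :
    d.insert k v = d := by
  apply PySem.Dict.ext
  have hc : d.contains k = true := by
    rw [PySem.Dict.contains_eq_isSome_get?, h]; rfl
  rw [PySem.Dict.items_insert_of_contains _ _ hc]
  apply pvMap_replace_self _ _ _ hnd
  intro p hp hpk
  have := PySem.Dict.get?_of_mem_items (d := d) (k := p.1) (v := p.2) hp hnd
  rw [hpk, h] at this
  exact (Option.some.injEq _ _).mp this.symm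

-- one nick step commutes with rendering
theorem pvStep_comm (f : String) (g : PySem.Dict String (List String)) (n : String)
    (hnd : g.keys.Nodup) :
    pvRender (g.insert n (g.getD n [] ++ [f])) = pvStepA f (pvRender g) n := by
  rw [pvRender_insert, pvJ_append, pvStepA]
  rw [pvRender_contains]
  by_cases hc : g.contains n = true
  · have hsome : ∃ vs, g.get? n = some vs := by
      rw [PySem.Dict.contains_eq_isSome_get?] at hc
      cases h : g.get? n
      · rw [h] at hc; simp at hc
      · exact ⟨_, rfl⟩
    obtain ⟨vs, hvs⟩ := hsome
    have hgetD : g.getD n [] = vs := PySem.Dict.getD_of_get?_eq_some _ _ hvs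
    have hRget : (pvRender g).get? n = some (pvJ vs) := by
      rw [pvRender_get?, hvs]; rfl
    have hRgetD : (pvRender g).getD n "" = pvJ vs :=
      PySem.Dict.getD_of_get?_eq_some _ _ hRget
    have hRnd : (pvRender g).keys.Nodup := by
      have : (pvRender g).keys = g.keys := by
        unfold pvRender PySem.Dict.keys
        obtain ⟨l⟩ := g
        simp [List.map_map]
      rw [this]; exact hnd
    rw [hgetD, hRgetD, hc]
    by_cases hf : f = ""
    · simp only [hf, ite_true]
      simp only [ne_eq, not_true_eq_false, if_false]
      exact pvInsert_self _ _ _ hRnd hRget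
    · simp only [ne_eq, hf, not_false_eq_true, if_true]
      by_cases hcur : pvJ vs = "" <;> simp [hcur]
  · have hc' : g.contains n = false := by simpa using hc
    have hgetD : g.getD n [] = [] := PySem.Dict.getD_of_not_contains _ _ hc'
    rw [hgetD, hc']
    simp only [Bool.false_eq_true, if_false]
    congr 1
    unfold pvJ
    by_cases hf : f = "" <;> simp [hf, pvSemijoin]

theorem pvInner (f : String) (nicks : List String) :
    ∀ g : PySem.Dict String (List String), g.keys.Nodup →
      (nicks.foldl (fun g nick => g.insert nick (g.getD nick [] ++ [f])) g).keys.Nodup ∧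
      pvRender (nicks.foldl (fun g nick => g.insert nick (g.getD nick [] ++ [f])) g)
        = nicks.foldl (pvStepA f) (pvRender g) := by
  induction nicks with
  | nil => intro g h; exact ⟨h, rfl⟩
  | cons n nicks ih =>
      intro g h
      have hnd' : (g.insert n (g.getD n [] ++ [f])).keys.Nodup :=
        PySem.Dict.nodup_keys_insert _ _ _ h
      obtain ⟨h1, h2⟩ := ih _ hnd'
      exact ⟨h1, by simpa [List.foldl_cons, pvStep_comm f g n h] using h2⟩

theorem pvOuter (ftp_fields : List (String × String)) (fm : List (String × List String)) :
    ∀ g : PySem.Dict String (List String), g.keys.Nodup →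
      (fm.foldl (fun g lp =>
        (lp.2.foldl (fun g nick => g.insert nick (g.getD nick [] ++ [(PySem.Dict.mk ftp_fields).getD lp.1 ""])) g)) g).keys.Nodup ∧
      pvRender (fm.foldl (fun g lp =>
        (lp.2.foldl (fun g nick => g.insert nick (g.getD nick [] ++ [(PySem.Dict.mk ftp_fields).getD lp.1 ""])) g)) g)
        = fm.foldl (fun acc lp => lp.2.foldl (pvStepA ((PySem.Dict.mk ftp_fields).getD lp.1 "")) acc) (pvRender g) := by
  induction fm with
  | nil => intro g h; exact ⟨h, rfl⟩
  | cons lp fm ih =>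
      intro g h
      obtain ⟨h1, h2⟩ := pvInner ((PySem.Dict.mk ftp_fields).getD lp.1 "") lp.2 g h
      obtain ⟨h3, h4⟩ := ih _ h1
      exact ⟨h3, by simpa [List.foldl_cons, h2] using h4⟩

-- ===== VERDICT (by name: the statement is the Claim_ definition above) =====
theorem apply_field_mapping_spec : Claim_equal_apply_field_mapping := by
  intro ftp_fields field_mapping _ _
  show apply_field_mapping ftp_fields field_mapping
      = apply_field_mapping_alt ftp_fields field_mapping
  have hnd : (PySem.Dict.mk ([] : List (String × List String))).keys.Nodup := by
    simp [PySem.Dict.keys]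
  obtain ⟨_, h⟩ := pvOuter ftp_fields field_mapping (PySem.Dict.mk []) hnd
  have hr0 : pvRender (PySem.Dict.mk ([] : List (String × List String)))
      = PySem.Dict.mk [] := rfl
  rw [hr0] at h
  show (field_mapping.foldl (fun acc lp =>
      lp.2.foldl (pvStepA ((PySem.Dict.mk ftp_fields).getD lp.1 "")) acc) (PySem.Dict.mk [])).items
    = (field_mapping.foldl (fun g lp =>
        lp.2.foldl (fun g nick => g.insert nick (g.getD nick [] ++ [(PySem.Dict.mk ftp_fields).getD lp.1 ""])) g)
        (PySem.Dict.mk [])).items.map (fun p => (p.1, pvSemijoin (p.2.filter (· ≠ ""))))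
  rw [← h]
  rfl
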